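-- pv_equiv track=rewrite | github.com/ankul-in/Two-years | KATA324.py | solve
-- ===== SOURCE A (Python) =====
-- def solve(s,k):
--     chars = list(s)
--     for letter in 'abcdefghijklmnopqrstuvwxyz':
--         if k == 0:
--             break
--         i = 0
--         while i < len(chars) and k > 0:
--             if chars[i] == letter:
--                 chars.pop(i)
--                 k -= 1
--             else:
--                 i += 1
--
--     return ''.join(chars)
-- ===== SOURCE B (Python) =====
-- def solve(s, k):
--     # Count each lowercase letter once, compute per-letter delete budgets
--     # greedily (alphabetical order), then build the result in a single pass
--     # skipping the leftmost budgeted occurrences.  O(n) instead of O(n^2).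
--     counts = {}
--     for ch in s:
--         if 'a' <= ch <= 'z':
--             counts[ch] = counts.get(ch, 0) + 1
--     todel = {}
--     rem = k
--     for letter in 'abcdefghijklmnopqrstuvwxyz':
--         if rem <= 0:
--             break
--         c = counts.get(letter, 0)
--         d = c if c < rem else rem
--         todel[letter] = d
--         rem -= d
--     out = []
--     for ch in s:
--         d = todel.get(ch, 0)
--         if d:
--             todel[ch] = d - 1
--         else:
--             out.append(ch)
--     return ''.join(out)
-- ===== Notes on version B (the rewrite author's own statement) =====
-- stated objective: faster
-- what changed: A makes 26 destructive scans of the char list with O(n) pops; B counts each lowercase letter once, computes per-letter delete budgets greedily over the alphabet, and builds the result in a single pass that skips the leftmost budgeted occurrences.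
import Mathlib
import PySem

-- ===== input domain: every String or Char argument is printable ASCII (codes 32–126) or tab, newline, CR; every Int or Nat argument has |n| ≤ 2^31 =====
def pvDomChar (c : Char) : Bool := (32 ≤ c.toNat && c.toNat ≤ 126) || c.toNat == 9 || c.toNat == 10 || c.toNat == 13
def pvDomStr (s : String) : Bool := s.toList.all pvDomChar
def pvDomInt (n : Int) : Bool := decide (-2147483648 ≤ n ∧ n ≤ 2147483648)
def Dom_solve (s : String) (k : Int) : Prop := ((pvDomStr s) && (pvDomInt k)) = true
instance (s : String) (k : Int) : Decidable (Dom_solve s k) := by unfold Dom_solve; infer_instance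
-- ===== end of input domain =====

-- B replaces A's 26 destructive scans (with O(n) pops) by counting letters once,
-- computing per-letter delete budgets greedily, and one pass that skips budgeted
-- occurrences; equivalence is proved for ALL inputs (both functions are total).

-- ===== PORT A =====

-- inner while loop: scan with index i popping occurrences of `c` while k > 0;
-- chars before i are never equal to c, so the loop is the structural recursion below
def solveInner (c : Char) (k : Int) : List Char → List Char × Int
  | [] => ([], k)
  | x :: xs =>
    if 0 < k then
      if x = c then solveInner c (k - 1) xs
      else
        let (r, k') := solveInner c k xs
        (x :: r, k')
    else (x :: xs, k)

-- for letter in 'abcdefghijklmnopqrstuvwxyz' with break on k == 0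
def solveOuter : List Char → List Char → Int → List Char
  | [], chars, _ => chars
  | l :: ls, chars, k =>
    if k = 0 then chars
    else
      let (r, k') := solveInner l k chars
      solveOuter ls r k'

def pvAlphabet : List Char := "abcdefghijklmnopqrstuvwxyz".toList

def solve (s : String) (k : Int) : String :=
  String.ofList (solveOuter pvAlphabet s.toList k)

-- ===== PORT B =====

-- counts = {}; for ch in s: if 'a' <= ch <= 'z': counts[ch] = counts.get(ch, 0) + 1
def altCounts (xs : List Char) : PySem.Dict Char Int :=
  xs.foldl (fun d ch => if 'a' ≤ ch ∧ ch ≤ 'z' then d.insert ch (d.getD ch 0 + 1) else d)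
    PySem.Dict.empty

-- todel = {}; rem = k; for letter in alphabet: break if rem <= 0; greedy budget
def altBudget : List Char → PySem.Dict Char Int → Int → PySem.Dict Char Int → PySem.Dict Char Int
  | [], _, _, todel => todel
  | l :: ls, counts, rem, todel =>
    if rem ≤ 0 then todel
    else
      let c := counts.getD l 0
      let d := if c < rem then c else rem
      altBudget ls counts (rem - d) (todel.insert l d)

-- out = []; for ch in s: d = todel.get(ch, 0); if d: decrement else keep
def altPass : List Char → PySem.Dict Char Int → List Char
  | [], _ => []
  | ch :: rest, todel =>
    let d := todel.getD ch 0
    if d ≠ 0 then altPass rest (todel.insert ch (d - 1))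
    else ch :: altPass rest todel

def solve_alt (s : String) (k : Int) : String :=
  String.ofList (altPass s.toList (altBudget pvAlphabet (altCounts s.toList) k PySem.Dict.empty))

-- ===== PRECONDITION & SPEC =====
def Spec_solve (s : String) (k : Int) (out : String) : Prop := out = solve_alt s k
instance (s : String) (k : Int) (out : String) : Decidable (Spec_solve s k out) := by unfold Spec_solve; infer_instance

-- ===== CLAIM (what is proved, stated in full; the proofs are below) =====
def Claim_equal_solve : Prop := ∀ (s : String) (k : Int), Dom_solve s k → Spec_solve s k (solve s k)

-- ===== LEMMAS AND PROOFS =====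

-- function update (proof-side view of a dict)
def fupd (m : Char → Int) (a : Char) (v : Int) : Char → Int :=
  fun b => if b = a then v else m b

-- keep every char, but skip the first (m c) occurrences of each char c
def mskip (m : Char → Int) : List Char → List Char
  | [] => []
  | x :: xs => if 0 < m x then mskip (fupd m x (m x - 1)) xs else x :: mskip m xs

-- the greedy per-letter budgets, as a function (common spec of both sides)
def gbud : List Char → List Char → Int → Char → Int
  | [], _, _ => fun _ => 0
  | l :: ls, xs, rem =>
    if rem ≤ 0 then fun _ => 0
    else
      let d := min (↑(xs.count l)) rem
      fupd (gbud ls xs (rem - d)) l d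

theorem fupd_self (m : Char → Int) (a : Char) (v w : Int) :
    fupd (fupd m a v) a w = fupd m a w := by
  funext b; by_cases h : b = a <;> simp [fupd, h]
theorem fupd_comm (m : Char → Int) (a b : Char) (v w : Int) (h : a ≠ b) :
    fupd (fupd m a v) b w = fupd (fupd m b w) a v := by
  funext x; by_cases hx : x = b <;> by_cases hy : x = a <;> simp_all [fupd]

theorem mskip_zero (m : Char → Int) (h : ∀ c, m c ≤ 0) (xs : List Char) :
    mskip m xs = xs := by
  induction xs with
  | nil => rfl
  | cons x xs ih =>
    have := h x
    simp [mskip, ih, show ¬ 0 < m x by omega]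

-- congruence on "effective budgets"
theorem mskip_congr (xs : List Char) : ∀ (m m' : Char → Int),
    (∀ c, max 0 (min (m c) (↑(xs.count c))) = max 0 (min (m' c) (↑(xs.count c)))) →
    mskip m xs = mskip m' xs := by
  induction xs with
  | nil => intro m m' _; rfl
  | cons x xs ih =>
    intro m m' h
    have hx := h x
    rw [List.count_cons_self] at hx
    push_cast at hx
    by_cases hpos : 0 < m x
    · have hpos' : 0 < m' x := by
        by_contra hc
        have hc1 : min (m' x) (↑(xs.count x) + 1) ≤ 0 := by omega
        have hc2 : (0:Int) < min (m x) (↑(xs.count x) + 1) := by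
          have : (0:Int) < ↑(xs.count x) + 1 := by positivity
          omega
        omega
      simp only [mskip, if_pos hpos, if_pos hpos']
      apply ih
      intro c
      by_cases hc : c = x
      · subst hc
        have e1 : fupd m c (m c - 1) c = m c - 1 := by simp [fupd]
        have e2 : fupd m' c (m' c - 1) c = m' c - 1 := by simp [fupd]
        rw [e1, e2]
        omega
      · have hcc := h c
        rw [List.count_cons_of_ne (Ne.symm hc)] at hcc
        simp only [fupd, if_neg hc]
        exact hcc
    · have hpos' : ¬ 0 < m' x := by
        by_contra hc
        have hc1 : min (m x) (↑(xs.count x) + 1) ≤ 0 := by omega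
        have hc2 : (0:Int) < min (m' x) (↑(xs.count x) + 1) := by
          have : (0:Int) < ↑(xs.count x) + 1 := by positivity
          omega
        omega
      simp only [mskip, if_neg hpos, if_neg hpos']
      congr 1
      apply ih
      intro c
      by_cases hc : c = x
      · subst hc
        have : (0:Int) ≤ ↑(xs.count c) := by positivity
        omega
      · have hcc := h c
        rw [List.count_cons_of_ne (Ne.symm hc)] at hcc
        exact hcc

def csingle (c : Char) (k : Int) : Char → Int := fupd (fun _ => 0) c k

-- solveInner computes the single-letter mskip and the leftover budget
theorem solveInner_eq (c : Char) (xs : List Char) : ∀ (k : Int), 0 ≤ k →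
    solveInner c k xs = (mskip (csingle c k) xs, k - min (↑(xs.count c)) k) := by
  induction xs with
  | nil =>
    intro k hk
    simp [solveInner, mskip]
    omega
  | cons x xs ih =>
    intro k hk
    by_cases hkp : 0 < k
    · by_cases hx : x = c
      · subst hx
        have h1 : (csingle x k) x = k := by simp [csingle, fupd]
        have hstep : solveInner x k (x :: xs) = solveInner x (k - 1) xs := by
          simp [solveInner, hkp]
        have hm : mskip (csingle x k) (x :: xs) = mskip (csingle x (k - 1)) xs := by
          simp only [mskip, h1, if_pos hkp]
          congr 1
          simp [csingle, fupd_self]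
        rw [hstep, ih (k - 1) (by omega), hm, List.count_cons_self]
        simp only [Prod.mk.injEq, true_and]
        push_cast
        omega
      · have h1 : (csingle c k) x = 0 := by simp [csingle, fupd, hx]
        have hstep : solveInner c k (x :: xs) =
            (x :: (solveInner c k xs).1, (solveInner c k xs).2) := by
          simp [solveInner, hkp, hx]
        have hm : mskip (csingle c k) (x :: xs) = x :: mskip (csingle c k) xs := by
          simp [mskip, h1]
        rw [hstep, ih k hk, hm, List.count_cons_of_ne hx]
    · have hk0 : k = 0 := by omega
      subst hk0
      have h1 : ∀ b, csingle c 0 b ≤ 0 := by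
        intro b; simp [csingle, fupd]
      simp [solveInner, mskip_zero _ h1]

theorem solveInner_neg (c : Char) (k : Int) (xs : List Char) (h : ¬ 0 < k) :
    solveInner c k xs = (xs, k) := by
  cases xs <;> simp [solveInner, h]

theorem count_mskip (c : Char) (xs : List Char) : ∀ (m : Char → Int), m c ≤ 0 →
    (mskip m xs).count c = xs.count c := by
  induction xs with
  | nil => intro m _; rfl
  | cons x xs ih =>
    intro m hm
    by_cases hpos : 0 < m x
    · have hxc : x ≠ c := by intro he; subst he; omega
      have : (fupd m x (m x - 1)) c = m c := by simp [fupd, hxc.symm]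
      simp only [mskip, if_pos hpos]
      rw [ih _ (by omega), List.count_cons, if_neg (by simp [hxc])]
      simp
    · simp only [mskip, if_neg hpos]
      simp [List.count_cons, ih m hm]

theorem gbud_nonpos (L : List Char) (xs : List Char) (k : Int) (hk : k ≤ 0) :
    gbud L xs k = fun _ => 0 := by
  cases L <;> simp [gbud, hk]

theorem gbud_notmem (L : List Char) : ∀ (xs : List Char) (k : Int) (c : Char), c ∉ L →
    gbud L xs k c = 0 := by
  induction L with
  | nil => intro xs k c _; rfl
  | cons l ls ih =>
    intro xs k c hc
    simp only [List.mem_cons, not_or] at hc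
    simp only [gbud]
    split
    · rfl
    · simp only [fupd, if_neg hc.1]
      exact ih _ _ _ hc.2

theorem gbud_nonneg (L : List Char) : ∀ (xs : List Char) (k : Int) (c : Char),
    0 ≤ gbud L xs k c := by
  induction L with
  | nil => intro xs k c; simp [gbud]
  | cons l ls ih =>
    intro xs k c
    simp only [gbud]
    split
    · simp
    · rename_i h
      simp only [fupd]
      split
      · have : (0:Int) ≤ ↑(xs.count l) := by positivity
        omega
      · exact ih _ _ _

theorem gbud_count_congr (L : List Char) : ∀ (xs ys : List Char) (k : Int),
    (∀ c ∈ L, ys.count c = xs.count c) → gbud L ys k = gbud L xs k := by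
  induction L with
  | nil => intro xs ys k _; rfl
  | cons l ls ih =>
    intro xs ys k h
    simp only [gbud, h l (by simp)]
    split
    · rfl
    · rw [ih xs ys _ (fun c hc => h c (by simp [hc]))]

-- merge: a single-letter skip absorbed into a multi-skip whose budget at c is 0
theorem mskip_merge (c : Char) (xs : List Char) : ∀ (m : Char → Int) (k : Int), m c = 0 →
    mskip m (mskip (csingle c k) xs) = mskip (fupd m c k) xs := by
  induction xs with
  | nil => intro m k _; rfl
  | cons x xs ih =>
    intro m k hm
    by_cases hx : x = c
    · subst hx
      have h1 : (csingle x k) x = k := by simp [csingle, fupd]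
      have h2 : (fupd m x k) x = k := by simp [fupd]
      by_cases hkp : 0 < k
      · simp only [mskip, h1, h2, if_pos hkp]
        rw [show fupd (csingle x k) x (k - 1) = csingle x (k - 1) by
          simp [csingle, fupd_self], ih m (k-1) hm, fupd_self]
      · simp only [mskip, h1, h2, if_neg hkp, hm, if_neg (by omega : ¬ (0:Int) < 0)]
        congr 1
        exact ih m k hm
    · have h1 : (csingle c k) x = 0 := by simp [csingle, fupd, hx]
      have h2 : (fupd m c k) x = m x := by simp [fupd, hx]
      simp only [mskip, h1, if_neg (by omega : ¬ (0:Int) < 0), h2]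
      by_cases hmx : 0 < m x
      · simp only [if_pos hmx]
        rw [ih _ k (by simp [fupd, hm, (Ne.symm hx)]), fupd_comm _ _ _ _ _ (Ne.symm hx)]
      · simp only [if_neg hmx]
        congr 1
        exact ih m k hm

-- A's outer loop computes the multi-skip of the greedy budgets
theorem solveOuter_eq (L : List Char) : ∀ (xs : List Char) (k : Int), L.Nodup →
    solveOuter L xs k = mskip (gbud L xs k) xs := by
  induction L with
  | nil =>
    intro xs k _
    exact (mskip_zero (fun _ => 0) (fun c => le_refl 0) xs).symm
  | cons l ls ih =>
    intro xs k hnd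
    have hnd' : ls.Nodup := hnd.of_cons
    have hlm : l ∉ ls := by simp [List.nodup_cons] at hnd; exact hnd.1
    by_cases hk0 : k = 0
    · subst hk0
      rw [show solveOuter (l :: ls) xs 0 = xs by simp [solveOuter],
        gbud_nonpos (l :: ls) xs 0 le_rfl,
        mskip_zero (fun _ => 0) (fun c => le_refl 0) xs]
    · by_cases hkp : 0 < k
      · have hinner := solveInner_eq l xs k (by omega)
        simp only [solveOuter, if_neg hk0, hinner]
        set d := min (↑(xs.count l)) k with hd
        set ys := mskip (csingle l k) xs with hys
        rw [ih ys (k - d) hnd']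
        have hcnt : ∀ c ∈ ls, ys.count c = xs.count c := by
          intro c hc
          apply count_mskip
          have : c ≠ l := fun he => hlm (he ▸ hc)
          simp [csingle, fupd, this]
        rw [gbud_count_congr ls xs ys _ hcnt]
        rw [mskip_merge l xs _ k (gbud_notmem ls xs (k - d) l hlm)]
        have hgb : gbud (l :: ls) xs k = fupd (gbud ls xs (k - d)) l d := by
          simp only [gbud, if_neg (by omega : ¬ k ≤ 0)]
          rw [← hd]
        rw [hgb]
        apply mskip_congr
        intro c
        by_cases hc : c = l
        · subst hc
          have e1 : fupd (gbud ls xs (k - d)) c k c = k := by simp [fupd]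
          have e2 : fupd (gbud ls xs (k - d)) c d c = d := by simp [fupd]
          rw [e1, e2]
          omega
        · simp [fupd, hc]
      · -- k < 0: inner loop does nothing, budgets all zero
        have hkneg : k < 0 := by omega
        simp only [solveOuter, if_neg hk0, solveInner_neg l k xs hkp]
        rw [ih xs k hnd', gbud_nonpos ls xs k (by omega),
          gbud_nonpos (l :: ls) xs k (by omega)]

-- B side: the counts dict seen through getD
theorem altCounts_getD (xs : List Char) : ∀ (d : PySem.Dict Char Int) (c : Char),
    (xs.foldl (fun d ch => if 'a' ≤ ch ∧ ch ≤ 'z' then d.insert ch (d.getD ch 0 + 1) else d) d).getD c 0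
      = d.getD c 0 + if 'a' ≤ c ∧ c ≤ 'z' then (↑(xs.count c) : Int) else 0 := by
  induction xs with
  | nil => intro d c; simp
  | cons x xs ih =>
    intro d c
    simp only [List.foldl_cons]
    by_cases hx : 'a' ≤ x ∧ x ≤ 'z'
    · rw [if_pos hx, ih]
      by_cases hc : c = x
      · subst hc
        rw [PySem.Dict.getD_insert, if_pos rfl, if_pos hx, if_pos hx,
          List.count_cons_self]
        push_cast; ring
      · rw [PySem.Dict.getD_insert, if_neg hc, List.count_cons_of_ne (Ne.symm hc)]
    · rw [if_neg hx, ih]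
      by_cases hc : c = x
      · subst hc
        rw [List.count_cons_self, if_neg hx, if_neg hx]
      · rw [List.count_cons_of_ne (Ne.symm hc)]

-- B side: the budget dict seen through getD is gbud
theorem altBudget_getD (L : List Char) : ∀ (xs : List Char) (counts td : PySem.Dict Char Int)
    (rem : Int), L.Nodup →
    (∀ c ∈ L, counts.getD c 0 = (↑(xs.count c) : Int)) →
    (∀ c ∈ L, td.getD c 0 = 0) →
    ∀ c, (altBudget L counts rem td).getD c 0 =
      if c ∈ L then gbud L xs rem c else td.getD c 0 := by
  induction L with
  | nil => intro xs counts td rem _ _ _ c; simp [altBudget]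
  | cons l ls ih =>
    intro xs counts td rem hnd hcnt htd c
    have hnd' : ls.Nodup := hnd.of_cons
    have hlm : l ∉ ls := by simp [List.nodup_cons] at hnd; exact hnd.1
    by_cases hrem : rem ≤ 0
    · simp only [altBudget, if_pos hrem]
      by_cases hc : c ∈ l :: ls
      · rw [if_pos hc, gbud_nonpos (l :: ls) xs rem hrem]
        exact htd c hc
      · rw [if_neg hc]
    · simp only [altBudget, if_neg hrem]
      rw [hcnt l (by simp)]
      have hdmin : (if (↑(xs.count l) : Int) < rem then (↑(xs.count l) : Int) else rem)
          = min (↑(xs.count l)) rem := by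
        simp [min_def]; omega
      rw [hdmin]
      set d := min (↑(xs.count l) : Int) rem with hd
      have hgb : ∀ c, gbud (l :: ls) xs rem c = fupd (gbud ls xs (rem - d)) l d c := by
        intro c
        simp only [gbud, if_neg hrem]
        rw [← hd]
      rw [ih xs counts (td.insert l d) (rem - d) hnd'
        (fun c hc => hcnt c (by simp [hc]))
        (fun c hc => by
          rw [PySem.Dict.getD_insert, if_neg (fun he : c = l => hlm (he ▸ hc))]
          exact htd c (by simp [hc]))]
      by_cases hc : c ∈ ls
      · rw [if_pos hc, if_pos (by simp [hc]), hgb c]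
        simp only [fupd, if_neg (fun he : c = l => hlm (he ▸ hc))]
      · rw [if_neg hc]
        by_cases hcl : c = l
        · subst hcl
          rw [PySem.Dict.getD_insert, if_pos rfl, if_pos (by simp), hgb c]
          simp [fupd]
        · rw [PySem.Dict.getD_insert, if_neg hcl,
            if_neg (by simp [hc, hcl])]

-- B side: the final pass is mskip of the dict's getD view
theorem altPass_eq (xs : List Char) : ∀ (td : PySem.Dict Char Int),
    (∀ c, 0 ≤ td.getD c 0) →
    altPass xs td = mskip (fun c => td.getD c 0) xs := by
  induction xs with
  | nil => intro td _; rfl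
  | cons x xs ih =>
    intro td hnn
    have hx := hnn x
    by_cases hd : td.getD x 0 ≠ 0
    · have hpos : 0 < td.getD x 0 := by omega
      simp only [altPass, if_pos hd, mskip, if_pos hpos]
      rw [ih _ (fun c => by
        rw [PySem.Dict.getD_insert]
        split
        · subst ‹c = x›; omega
        · exact hnn c)]
      apply mskip_congr
      intro c
      rw [PySem.Dict.getD_insert]
      by_cases hc : c = x
      · subst hc; simp [fupd]
      · simp [fupd, hc]
    · simp only [altPass, if_neg hd, mskip,
        if_neg (show ¬ 0 < td.getD x 0 by omega)]
      congr 1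
      exact ih td hnn

theorem pvAlphabet_eq : pvAlphabet = ['a','b','c','d','e','f','g','h','i','j','k','l','m',
    'n','o','p','q','r','s','t','u','v','w','x','y','z'] := by
  rfl

theorem pvAlphabet_nodup : pvAlphabet.Nodup := by
  rw [pvAlphabet_eq]; decide

theorem pvAlphabet_lower : ∀ c ∈ pvAlphabet, 'a' ≤ c ∧ c ≤ 'z' := by
  rw [pvAlphabet_eq]
  intro c hc
  simp only [List.mem_cons, List.not_mem_nil, or_false] at hc
  rcases hc with rfl|rfl|rfl|rfl|rfl|rfl|rfl|rfl|rfl|rfl|rfl|rfl|rfl|rfl|rfl|rfl|rfl|rfl|rfl|rfl|rfl|rfl|rfl|rfl|rfl|rfl <;>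
    exact ⟨by decide, by decide⟩

theorem solve_eq_alt (s : String) (k : Int) : solve s k = solve_alt s k := by
  unfold solve solve_alt
  congr 1
  rw [solveOuter_eq pvAlphabet s.toList k pvAlphabet_nodup]
  rw [altPass_eq s.toList _ (fun c => by
    rw [altBudget_getD pvAlphabet s.toList (altCounts s.toList) PySem.Dict.empty k
      pvAlphabet_nodup
      (fun c hc => by
        unfold altCounts
        rw [altCounts_getD, if_pos (pvAlphabet_lower c hc)]
        simp)
      (fun c _ => by simp)]
    split
    · exact gbud_nonneg _ _ _ _
    · simp)]
  congr 1
  funext c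
  rw [altBudget_getD pvAlphabet s.toList (altCounts s.toList) PySem.Dict.empty k
    pvAlphabet_nodup
    (fun c hc => by
      unfold altCounts
      rw [altCounts_getD, if_pos (pvAlphabet_lower c hc)]
      simp)
    (fun c _ => by simp)]
  by_cases hc : c ∈ pvAlphabet
  · rw [if_pos hc]
  · rw [if_neg hc, gbud_notmem pvAlphabet s.toList k c hc]
    simp

-- ===== VERDICT (by name: the statement is the Claim_ definition above) =====
theorem solve_spec : Claim_equal_solve := by
  intro s k _
  unfold Spec_solve
  exact solve_eq_alt s k
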